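-- pv_equiv track=rewrite | github.com/JamesMCo/Advent-Of-Code | 2018/02/Part1.py | solve
-- ===== SOURCE A (Python) =====
-- import string
--
-- def solve(puzzle_input):
--     twos = 0
--     threes = 0
--
--     for i in puzzle_input:
--         if sum([1 for x in string.ascii_lowercase if i.count(x) == 2]) >= 1:
--             twos += 1
--
--         if sum([1 for x in string.ascii_lowercase if i.count(x) == 3]) >= 1:
--             threes += 1
--
--     return twos * threes
-- ===== SOURCE B (Python) =====
-- import string
--
-- def solve(puzzle_input):
--     twos = 0
--     threes = 0
--
--     for i in puzzle_input:
--         letters = sorted(c for c in i if c in string.ascii_lowercase)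
--         runs = set()
--         j = 0
--         while j < len(letters):
--             k = j
--             while k < len(letters) and letters[k] == letters[j]:
--                 k += 1
--             runs.add(k - j)
--             j = k
--         if 2 in runs:
--             twos += 1
--         if 3 in runs:
--             threes += 1
--
--     return twos * threes
-- ===== Notes on version B (the rewrite author's own statement) =====
-- stated objective: faster
-- what changed: Instead of scanning each string 26 times with str.count (once per lowercase letter), B sorts each string's lowercase letters and does one adjacent-run scan over the sorted sequence, collecting the set of run lengths and testing 2 and 3 for membership.
import Mathlib
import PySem

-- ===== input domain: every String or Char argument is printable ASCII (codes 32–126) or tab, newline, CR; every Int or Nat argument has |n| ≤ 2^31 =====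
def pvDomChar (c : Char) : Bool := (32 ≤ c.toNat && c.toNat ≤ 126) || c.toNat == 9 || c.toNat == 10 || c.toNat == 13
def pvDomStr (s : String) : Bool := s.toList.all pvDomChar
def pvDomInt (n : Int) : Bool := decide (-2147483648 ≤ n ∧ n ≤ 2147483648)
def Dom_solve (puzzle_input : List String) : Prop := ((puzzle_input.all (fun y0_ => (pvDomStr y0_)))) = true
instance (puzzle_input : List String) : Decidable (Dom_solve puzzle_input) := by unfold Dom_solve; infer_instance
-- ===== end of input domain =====

-- B replaces A's 26 per-letter str.count passes over each string by: sort the string's lowercase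
-- letters, scan adjacent runs once, collect the set of run lengths, test 2 and 3 for membership.

-- ===== PORT A =====
-- loop body of A: x iterates over string.ascii_lowercase (chars); i.count(x) is PySem.Str.count
def pvStepA (acc : Int × Int) (i : String) : Int × Int :=
  let twos := if 1 ≤ ((("abcdefghijklmnopqrstuvwxyz".toList.filter
      (fun x => PySem.Str.count i (String.ofList [x]) == 2))).map (fun _ => (1:Int))).sum
    then acc.1 + 1 else acc.1
  let threes := if 1 ≤ ((("abcdefghijklmnopqrstuvwxyz".toList.filter
      (fun x => PySem.Str.count i (String.ofList [x]) == 3))).map (fun _ => (1:Int))).sum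
    then acc.2 + 1 else acc.2
  (twos, threes)

def solve (puzzle_input : List String) : Int :=
  let r := puzzle_input.foldl pvStepA (0, 0)
  r.1 * r.2

-- ===== PORT B =====
-- the inner while loops of B: from the current position, the run is the maximal block of
-- characters equal to the first (takeWhile); k - j is 1 + its length within the tail; j = k
-- continues after the run (dropWhile)
def pvRunLengths : List Char → List Nat
  | [] => []
  | c :: t => (1 + (t.takeWhile (· == c)).length) :: pvRunLengths (t.dropWhile (· == c))
  termination_by l => l.length
  decreasing_by
    simp only [List.length_cons]
    exact Nat.lt_succ_of_le (List.length_dropWhile_le _ _)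

def pvStepB (acc : Int × Int) (i : String) : Int × Int :=
  let letters := PySem.List.sorted
    (i.toList.filter (fun c => ("abcdefghijklmnopqrstuvwxyz".toList).contains c)) (fun x => x) false
  let runs := PySem.Set.ofList (pvRunLengths letters)
  let twos := if runs.contains 2 then acc.1 + 1 else acc.1
  let threes := if runs.contains 3 then acc.2 + 1 else acc.2
  (twos, threes)

def solve_alt (puzzle_input : List String) : Int :=
  let r := puzzle_input.foldl pvStepB (0, 0)
  r.1 * r.2

-- ===== PRECONDITION & SPEC =====
def Spec_solve (puzzle_input : List String) (out : Int) : Prop := out = solve_alt puzzle_input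
instance (puzzle_input : List String) (out : Int) : Decidable (Spec_solve puzzle_input out) := by unfold Spec_solve; infer_instance

-- ===== CLAIM (what is proved, stated in full; the proofs are below) =====
def Claim_equal_solve : Prop := ∀ (puzzle_input : List String), Dom_solve puzzle_input → Spec_solve puzzle_input (solve puzzle_input)

-- ===== LEMMAS AND PROOFS =====

-- counting a single-character needle with Python's str.count is List.count
theorem pv_go_singleton (c : Char) : ∀ (l : List Char) (fuel acc : Nat), l.length ≤ fuel →
    PySem.Chars.count.go [c] fuel l acc = acc + l.count c
  | [], fuel, acc, _ => by cases fuel <;> simp [PySem.Chars.count.go]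
  | h :: t, 0, acc, hle => by simp at hle
  | h :: t, fuel + 1, acc, hle => by
    rw [PySem.Chars.count.go]
    simp only [List.isPrefixOf, List.count_cons]
    by_cases hc : c = h
    · subst hc
      simp only [beq_self_eq_true, Bool.and_true, if_pos, List.length_singleton, List.drop_one,
        List.tail_cons]
      rw [pv_go_singleton c t fuel (acc + 1) (by simpa using hle)]
      ring
    · rw [if_neg (by simp; exact hc)]
      rw [pv_go_singleton c t fuel acc (by simpa using hle)]
      simp [Ne.symm hc]

theorem pv_count_singleton (s : List Char) (c : Char) : PySem.Chars.count s [c] = s.count c := by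
  simp [PySem.Chars.count]
  simpa using pv_go_singleton c s s.length 0 le_rfl

-- A's per-word test: "some lowercase letter occurs exactly n times in w"
theorem pv_condA_iff (w : String) (n : Nat) :
    (1 ≤ ((("abcdefghijklmnopqrstuvwxyz".toList.filter
        (fun x => PySem.Str.count w (String.ofList [x]) == n))).map (fun _ => (1:Int))).sum)
    ↔ ∃ c ∈ "abcdefghijklmnopqrstuvwxyz".toList, w.toList.count c = n := by
  rw [PySem.List.sum_map_const_int]
  constructor
  · intro h
    have hne : ("abcdefghijklmnopqrstuvwxyz".toList.filter
        (fun x => PySem.Str.count w (String.ofList [x]) == n)) ≠ [] := by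
      intro he; rw [he] at h; simp at h
    obtain ⟨x, hx⟩ := List.exists_mem_of_ne_nil _ hne
    have hcnt := List.of_mem_filter hx
    simp only [beq_iff_eq, PySem.Str.count_eq] at hcnt
    rw [show (String.ofList [x]).toList = [x] by simp, pv_count_singleton] at hcnt
    exact ⟨x, List.mem_of_mem_filter hx, hcnt⟩
  · rintro ⟨k, hklower, hkcount⟩
    have hk : k ∈ ("abcdefghijklmnopqrstuvwxyz".toList.filter
        (fun x => PySem.Str.count w (String.ofList [x]) == n)) := by
      refine List.mem_filter.mpr ⟨hklower, ?_⟩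
      simp only [beq_iff_eq, PySem.Str.count_eq]
      rw [show (String.ofList [k]).toList = [k] by simp, pv_count_singleton]
      exact hkcount
    have := List.length_pos_of_mem hk
    omega

-- run lengths of a sorted list are exactly the positive multiplicities
theorem pv_mem_runLengths : ∀ (l : List Char), l.Pairwise (· ≤ ·) → ∀ (n : Nat), 0 < n →
    (n ∈ pvRunLengths l ↔ ∃ c, l.count c = n)
  | [], _, n, hn => by
    simp only [pvRunLengths, List.not_mem_nil, false_iff, not_exists, List.count_nil]
    intro c h; omega
  | c :: t, hl, n, hn => by
    have hpb0 : (t.dropWhile (· == c)).Pairwise (· ≤ ·) :=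
      ((List.pairwise_cons.mp hl).2).sublist (List.dropWhile_sublist _)
    have ih0 := pv_mem_runLengths (t.dropWhile (· == c)) hpb0 n hn
    have key : ∀ a b : List Char, a = t.takeWhile (· == c) → b = t.dropWhile (· == c) →
        (n ∈ pvRunLengths b ↔ ∃ c', b.count c' = n) →
        (n = 1 + a.length ∨ n ∈ pvRunLengths b ↔ ∃ c', (c :: t).count c' = n) := by
      intro a b ha hb ih
      have hab : a ++ b = t := by rw [ha, hb]; exact List.takeWhile_append_dropWhile
      have hta : ∀ x ∈ a, x = c := by
        intro x hx
        rw [ha] at hx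
        simpa using List.mem_takeWhile_imp hx
      have hct : ∀ x ∈ t, c ≤ x := by
        intro x hx
        exact (List.pairwise_cons.mp hl).1 x hx
      have hbsub : b.Sublist t := by rw [hb]; exact List.dropWhile_sublist _
      have hpb : b.Pairwise (· ≤ ·) := ((List.pairwise_cons.mp hl).2).sublist hbsub
      have hcb : c ∉ b := by
        intro hc
        cases hd : b with
        | nil => rw [hd] at hc; simp at hc
        | cons d r =>
          have hne' : t.dropWhile (· == c) ≠ [] := by rw [← hb, hd]; simp
          have hdne := List.head_dropWhile_not (fun x => x == c) hne'
          have hhead : (t.dropWhile (· == c)).head hne' = d := by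
            have heq : t.dropWhile (· == c) = d :: r := by rw [← hb, hd]
            simp [heq]
          rw [hhead] at hdne
          have hdc : d ≠ c := by simpa using hdne
          have hdt : d ∈ t := hbsub.mem (by rw [hd]; exact List.mem_cons_self)
          have hcd : c < d := lt_of_le_of_ne (hct d hdt) (Ne.symm hdc)
          rw [hd] at hc hpb
          rcases List.mem_cons.mp hc with h | h
          · exact hdc (h.symm ▸ rfl)
          · exact absurd ((List.pairwise_cons.mp hpb).1 c h) (not_le_of_gt hcd)
      have hcount_c : (c :: t).count c = 1 + a.length := by
        rw [← hab, ← List.cons_append, List.count_append, List.count_cons_self,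
          List.count_eq_length.mpr (fun x hx => (hta x hx).symm),
          List.count_eq_zero.mpr hcb]
        omega
      have hcount_ne : ∀ c', c' ≠ c → (c :: t).count c' = b.count c' := by
        intro c' hne
        have h0 : (c :: a).count c' = 0 := List.count_eq_zero.mpr (by
          intro hc'
          rcases List.mem_cons.mp hc' with h | h
          · exact hne h
          · exact hne (hta c' h))
        rw [← hab, ← List.cons_append, List.count_append, h0, Nat.zero_add]
      rw [ih]
      constructor
      · rintro (h | ⟨c', hc'⟩)
        · exact ⟨c, by omega⟩
        · refine ⟨c', ?_⟩
          have hmem : c' ∈ b := List.count_pos_iff.mp (by omega)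
          rw [hcount_ne c' (fun he => hcb (he ▸ hmem))]
          exact hc'
      · rintro ⟨c', hc'⟩
        by_cases he : c' = c
        · subst he; left; omega
        · right; exact ⟨c', by rw [← hcount_ne c' he]; exact hc'⟩
    rw [pvRunLengths]
    simp only [List.mem_cons]
    exact key _ _ rfl rfl ih0
  termination_by l => l.length
  decreasing_by
    simp only [List.length_cons]
    exact Nat.lt_succ_of_le (List.length_dropWhile_le _ _)

-- B's per-word test equals A's
theorem pv_condB_iff (w : String) (n : Nat) (hn : 0 < n) :
    ((PySem.Set.ofList (pvRunLengths (PySem.List.sorted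
        (w.toList.filter (fun c => ("abcdefghijklmnopqrstuvwxyz".toList).contains c))
        (fun x => x) false))).contains n) = true
    ↔ ∃ c ∈ "abcdefghijklmnopqrstuvwxyz".toList, w.toList.count c = n := by
  have hsorted : (PySem.List.sorted
      (w.toList.filter (fun c => ("abcdefghijklmnopqrstuvwxyz".toList).contains c))
      (fun x => x) false).Pairwise (· ≤ ·) := by
    simpa using PySem.List.sorted_pairwise
      (xs := w.toList.filter (fun c => ("abcdefghijklmnopqrstuvwxyz".toList).contains c))
      (key := fun x => x)
  have hperm : (PySem.List.sorted
      (w.toList.filter (fun c => ("abcdefghijklmnopqrstuvwxyz".toList).contains c))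
      (fun x => x) false).Perm
      (w.toList.filter (fun c => ("abcdefghijklmnopqrstuvwxyz".toList).contains c)) :=
    PySem.List.sorted_perm ..
  rw [PySem.Set.contains_iff, PySem.Set.mem_ofList,
    pv_mem_runLengths _ hsorted n hn]
  constructor
  · rintro ⟨c, hc⟩
    rw [hperm.count_eq] at hc
    have hcf : c ∈ w.toList.filter (fun c => ("abcdefghijklmnopqrstuvwxyz".toList).contains c) :=
      List.count_pos_iff.mp (by omega)
    have hp := (List.mem_filter.mp hcf).2
    refine ⟨c, by simpa using hp, ?_⟩
    rw [List.count_filter hp] at hc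
    exact hc
  · rintro ⟨c, hmem, hcnt⟩
    refine ⟨c, ?_⟩
    rw [hperm.count_eq, List.count_filter (by simpa using hmem)]
    exact hcnt

theorem pv_step_eq : pvStepA = pvStepB := by
  funext acc i
  unfold pvStepA pvStepB
  rw [if_congr ((pv_condA_iff i 2).trans (pv_condB_iff i 2 (by omega)).symm) rfl rfl,
    if_congr ((pv_condA_iff i 3).trans (pv_condB_iff i 3 (by omega)).symm) rfl rfl]

-- ===== VERDICT (by name: the statement is the Claim_ definition above) =====
theorem solve_spec : Claim_equal_solve := by
  intro puzzle_input _
  unfold Spec_solve solve solve_alt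
  rw [pv_step_eq]
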